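-- pv_equiv track=rewrite | github.com/NeapolitanIcecream/recoleta | scripts/refactor_audit.py | _routing_pressure
-- ===== SOURCE A (Python) =====
-- from typing import Any, Callable, Iterable, Literal, cast
--
-- def _routing_pressure(agent_routing_queue: list[dict[str, Any]]) -> str:
--     if any(item["priority_band"] == "investigate_now" for item in agent_routing_queue):
--         return "investigate_now"
--     if any(
--         item["priority_band"] == "investigate_soon" for item in agent_routing_queue
--     ):
--         return "investigate_soon"
--     if agent_routing_queue:
--         return "watch_only"
--     return "none"
-- ===== SOURCE B (Python) =====
-- def _routing_pressure(agent_routing_queue):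
--     found_soon = False
--     for item in agent_routing_queue:
--         band = item["priority_band"]
--         if band == "investigate_now":
--             return "investigate_now"
--         if band == "investigate_soon":
--             found_soon = True
--     if found_soon:
--         return "investigate_soon"
--     if agent_routing_queue:
--         return "watch_only"
--     return "none"
-- ===== Notes on version B (the rewrite author's own statement) =====
-- stated objective: faster
-- what changed: Replaces A's two sequential any() scans over the queue with a single pass that returns early on 'investigate_now' and otherwise remembers whether 'investigate_soon' was seen.
import Mathlib
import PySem

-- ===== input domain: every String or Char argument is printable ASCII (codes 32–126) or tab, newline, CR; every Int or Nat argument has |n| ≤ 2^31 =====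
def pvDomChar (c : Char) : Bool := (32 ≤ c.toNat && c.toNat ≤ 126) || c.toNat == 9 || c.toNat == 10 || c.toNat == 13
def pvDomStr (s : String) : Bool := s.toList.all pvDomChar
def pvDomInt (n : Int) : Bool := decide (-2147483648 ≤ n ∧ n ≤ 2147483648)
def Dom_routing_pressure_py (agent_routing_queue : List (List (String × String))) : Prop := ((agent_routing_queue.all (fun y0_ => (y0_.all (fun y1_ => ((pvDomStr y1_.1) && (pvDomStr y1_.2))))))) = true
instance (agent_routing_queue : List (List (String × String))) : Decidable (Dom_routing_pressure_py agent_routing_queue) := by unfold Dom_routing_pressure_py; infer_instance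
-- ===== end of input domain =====

-- B replaces A's two sequential any() scans with one early-returning pass; equivalence proved on Pre_ (inputs where A returns, i.e. no KeyError).


-- dict lookup item["priority_band"]: first match in the association list (none = KeyError, excluded by Pre_)
def pvBand? (item : List (String × String)) : Option String :=
  (PySem.Dict.mk item).get? "priority_band"

-- ===== PORT A =====
-- any(item["priority_band"] == b for item in q); on a missing key Python raises (excluded by Pre_), here the item just does not match
def pyAnyBand : List (List (String × String)) → String → Bool
  | [], _ => false
  | item :: rest, b => if pvBand? item == some b then true else pyAnyBand rest b

def routing_pressure_py (agent_routing_queue : List (List (String × String))) : String :=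
  if pyAnyBand agent_routing_queue "investigate_now" then "investigate_now"
  else if pyAnyBand agent_routing_queue "investigate_soon" then "investigate_soon"
  else if !agent_routing_queue.isEmpty then "watch_only"
  else "none"

-- ===== PORT B =====
-- the single loop: 'none' = early return "investigate_now"; 'some fs' = loop finished with found_soon = fs
def altGo : List (List (String × String)) → Bool → Option Bool
  | [], found_soon => some found_soon
  | item :: rest, found_soon =>
      let band := pvBand? item
      if band == some "investigate_now" then none
      else altGo rest (if band == some "investigate_soon" then true else found_soon)

def routing_pressure_py_alt (agent_routing_queue : List (List (String × String))) : String :=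
  match altGo agent_routing_queue false with
  | none => "investigate_now"
  | some found_soon =>
      if found_soon then "investigate_soon"
      else if !agent_routing_queue.isEmpty then "watch_only"
      else "none"

-- ===== PRECONDITION & SPEC =====
-- Pre_ excludes exactly the inputs where Python A raises KeyError: an item missing "priority_band"
-- that is reached before any "investigate_now" item (both programs raise there).
def Pre_routing_pressure_py (agent_routing_queue : List (List (String × String))) : Prop :=
  ∀ item ∈ agent_routing_queue.takeWhile (fun d => !(pvBand? d == some "investigate_now")),
    (pvBand? item).isSome = true
instance (agent_routing_queue : List (List (String × String))) : Decidable (Pre_routing_pressure_py agent_routing_queue) := by unfold Pre_routing_pressure_py; infer_instance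
def pvWitness_routing_pressure_py : (List (List (String × String))) :=
  [[("priority_band", "investigate_soon")], [("priority_band", "watch_only")]]
def Spec_routing_pressure_py (agent_routing_queue : List (List (String × String))) (out : String) : Prop := out = routing_pressure_py_alt agent_routing_queue
instance (agent_routing_queue : List (List (String × String))) (out : String) : Decidable (Spec_routing_pressure_py agent_routing_queue out) := by unfold Spec_routing_pressure_py; infer_instance

-- ===== CLAIM (what is proved, stated in full; the proofs are below) =====
def Claim_equal_routing_pressure_py : Prop := ∀ (agent_routing_queue : List (List (String × String))), Dom_routing_pressure_py agent_routing_queue → Pre_routing_pressure_py agent_routing_queue → Spec_routing_pressure_py agent_routing_queue (routing_pressure_py agent_routing_queue)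

-- ===== LEMMAS AND PROOFS =====

-- the early return fires exactly when A's first any() is true (independent of the flag)
theorem altGo_none_iff (q : List (List (String × String))) (fs : Bool) :
    altGo q fs = none ↔ pyAnyBand q "investigate_now" = true := by
  induction q generalizing fs with
  | nil => simp [altGo, pyAnyBand]
  | cons item rest ih =>
      simp only [altGo, pyAnyBand]
      by_cases h : pvBand? item == some "investigate_now" <;> simp [h, ih]

-- when the loop finishes, the flag is the initial flag OR A's second any()
theorem altGo_some (q : List (List (String × String))) (fs fs' : Bool)
    (h : altGo q fs = some fs') : fs' = (fs || pyAnyBand q "investigate_soon") := by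
  induction q generalizing fs with
  | nil => simp [altGo] at h; simp [pyAnyBand, h]
  | cons item rest ih =>
      simp only [altGo] at h
      by_cases hn : pvBand? item == some "investigate_now"
      · simp [hn] at h
      · simp only [hn, if_false, Bool.false_eq_true] at h
        by_cases hs : pvBand? item == some "investigate_soon"
        · simp only [hs, if_true] at h
          simp [pyAnyBand, hs, ih _ h]
        · simp only [hs, if_false, Bool.false_eq_true] at h
          simp [pyAnyBand, hs, ih _ h]

-- ===== VERDICT (by name: the statement is the Claim_ definition above) =====
theorem routing_pressure_py_spec : Claim_equal_routing_pressure_py := by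
  intro q _ _
  unfold Spec_routing_pressure_py routing_pressure_py routing_pressure_py_alt
  by_cases hn : pyAnyBand q "investigate_now" = true
  · rw [(altGo_none_iff q false).mpr hn]
    simp [hn]
  · have hne : altGo q false ≠ none := fun h => hn ((altGo_none_iff q false).mp h)
    obtain ⟨fs, hfs⟩ := Option.ne_none_iff_exists'.mp hne
    rw [hfs]
    have := altGo_some q false fs hfs
    simp only [Bool.false_or] at this
    subst this
    simp [hn]
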